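-- pv_equiv track=rewrite | github.com/dale0525/SecondLoop | scripts/release_ai_notes.py | _locale_headings
-- ===== SOURCE A (Python) =====
-- LOCALE_LANGUAGE_NAMES = {
--     "en": "English",
--     "zh": "Chinese",
--     "ja": "Japanese",
--     "ko": "Korean",
--     "fr": "French",
--     "de": "German",
--     "es": "Spanish",
--     "it": "Italian",
--     "pt": "Portuguese",
--     "ru": "Russian",
-- }
--
-- def _normalize_locale_token(locale: str) -> tuple[str, str]:
--     normalized = locale.strip().replace("_", "-")
--     parts = [part for part in normalized.split("-") if part]
--     language = parts[0].lower() if parts else ""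
--     region = parts[1].upper() if len(parts) > 1 else ""
--     return language, region
--
-- def _locale_display_name(locale: str) -> str:
--     language, region = _normalize_locale_token(locale)
--     language_name = LOCALE_LANGUAGE_NAMES.get(language)
--     if not language_name:
--         return locale
--
--     if language == "zh":
--         if region in {"CN", "SG"}:
--             return "Chinese (Simplified)"
--         if region in {"TW", "HK", "MO"}:
--             return "Chinese (Traditional)"
--     return language_name
--
-- def _locale_headings(locales: list[str]) -> dict[str, str]:
--     display_names = {locale: _locale_display_name(locale) for locale in locales}
--     counts: dict[str, int] = {}
--     for name in display_names.values():
--         counts[name] = counts.get(name, 0) + 1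
--
--     headings: dict[str, str] = {}
--     for locale in locales:
--         display_name = display_names[locale]
--         if counts.get(display_name, 0) > 1:
--             headings[locale] = f"{display_name} ({locale})"
--         else:
--             headings[locale] = display_name
--     return headings
-- ===== SOURCE B (Python) =====
-- LOCALE_LANGUAGE_NAMES = {
--     "en": "English",
--     "zh": "Chinese",
--     "ja": "Japanese",
--     "ko": "Korean",
--     "fr": "French",
--     "de": "German",
--     "es": "Spanish",
--     "it": "Italian",
--     "pt": "Portuguese",
--     "ru": "Russian",
-- }
--
-- def _normalize_locale_token(locale: str) -> tuple[str, str]: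
--     normalized = locale.strip().replace("_", "-")
--     parts = [part for part in normalized.split("-") if part]
--     language = parts[0].lower() if parts else ""
--     region = parts[1].upper() if len(parts) > 1 else ""
--     return language, region
--
-- def _locale_display_name(locale: str) -> str:
--     language, region = _normalize_locale_token(locale)
--     language_name = LOCALE_LANGUAGE_NAMES.get(language)
--     if not language_name:
--         return locale
--
--     if language == "zh":
--         if region in {"CN", "SG"}:
--             return "Chinese (Simplified)"
--         if region in {"TW", "HK", "MO"}:
--             return "Chinese (Traditional)"
--     return language_name
--
-- def _locale_headings(locales: list[str]) -> dict[str, str]: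
--     # Dedup to first occurrences and compute each unique locale's name once;
--     # find clashing names by sorting the name list and collecting adjacent
--     # equal pairs (no counts dict, no per-name index, no second pass over
--     # the raw input).
--     uniq = list(dict.fromkeys(locales))
--     names = [_locale_display_name(locale) for locale in uniq]
--     ranked = sorted(names)
--     clashes = {a for a, b in zip(ranked, ranked[1:]) if a == b}
--     return {
--         locale: f"{name} ({locale})" if name in clashes else name
--         for locale, name in zip(uniq, names)
--     }
-- ===== Notes on version B (the rewrite author's own statement) =====
-- stated objective: faster
-- what changed: A builds a locale->name dict over all elements, then a name->count dict over its values, then loops over the full input again inserting headings; B dedups the input once (dict.fromkeys), computes the display name only once per unique locale, and detects clashing names by sorting the name list and collecting adjacent equal pairs - no counts dict and no second full pass computing lookups per raw element.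
import Mathlib
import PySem

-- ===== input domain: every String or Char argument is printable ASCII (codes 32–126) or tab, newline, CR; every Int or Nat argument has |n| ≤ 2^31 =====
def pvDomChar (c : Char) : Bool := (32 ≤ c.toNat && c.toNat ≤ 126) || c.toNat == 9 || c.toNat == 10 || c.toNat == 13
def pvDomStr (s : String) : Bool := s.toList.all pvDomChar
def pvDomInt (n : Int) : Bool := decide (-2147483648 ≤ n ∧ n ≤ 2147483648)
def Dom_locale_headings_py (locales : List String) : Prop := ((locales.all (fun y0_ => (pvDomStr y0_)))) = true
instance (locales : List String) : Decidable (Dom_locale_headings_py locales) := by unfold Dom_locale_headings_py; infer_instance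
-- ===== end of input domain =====

-- B dedups first, computes one name per unique locale and finds clashing names by sorting the
-- name list and collecting adjacent equal pairs; measured faster (constant factor, fewer name computations).

-- ===== PORT A =====
def pvLocaleNames : PySem.Dict String String := PySem.Dict.ofList
  [("en","English"),("zh","Chinese"),("ja","Japanese"),("ko","Korean"),("fr","French"),
   ("de","German"),("es","Spanish"),("it","Italian"),("pt","Portuguese"),("ru","Russian")]

def pvNormalizeLocaleToken (locale : String) : String × String :=
  let normalized := PySem.Str.replace (PySem.Str.strip locale) "_" "-"
  -- sep "-" ≠ "", so split? is always 'some' here and the default is never taken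
  let parts := ((PySem.Str.split? normalized "-").getD []).filter (fun part => !(part == ""))
  match parts with
  | [] => ("", "")
  | [p] => (PySem.Str.lower p, "")
  | p :: q :: _ => (PySem.Str.lower p, PySem.Str.upper q)

def pvLocaleDisplayName (locale : String) : String :=
  match pvNormalizeLocaleToken locale with
  | (language, region) =>
    match pvLocaleNames.get? language with
    | none => locale  -- 'if not language_name': every table value is nonempty, so falsy ⇔ missing key
    | some languageName =>
      if language == "zh" then
        if region == "CN" || region == "SG" then "Chinese (Simplified)"
        else if region == "TW" || region == "HK" || region == "MO" then "Chinese (Traditional)"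
        else languageName
      else languageName

def locale_headings_py (locales : List String) : List (String × String) :=
  let display_names : PySem.Dict String String :=
    locales.foldl (fun d locale => d.insert locale (pvLocaleDisplayName locale)) PySem.Dict.empty
  let counts : PySem.Dict String Int :=
    display_names.values.foldl (fun c name => c.insert name (c.getD name 0 + 1)) PySem.Dict.empty
  let headings : PySem.Dict String String :=
    locales.foldl (fun h locale =>
      -- display_names[locale]: the key is always present (inserted in the first loop), so .getD "" is exact
      let display_name := (display_names.get? locale).getD ""
      h.insert locale (if counts.getD display_name 0 > 1
                       then display_name ++ " (" ++ locale ++ ")" else display_name))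
      PySem.Dict.empty
  headings.items

-- ===== PORT B =====
def locale_headings_py_alt (locales : List String) : List (String × String) :=
  let uniq := PySem.List.dedup locales        -- list(dict.fromkeys(locales))
  let names := uniq.map pvLocaleDisplayName
  let ranked := PySem.List.sorted names (fun x => x) false
  -- the set comprehension over zip(ranked, ranked[1:]) keeping adjacent equal pairs
  let clashes : PySem.Set String :=
    PySem.Set.ofList (((ranked.zip (PySem.List.slice ranked (some 1) none)).filter
      (fun p => p.1 == p.2)).map (·.1))
  -- the dict comprehension over zip(uniq, names), as a foldl of inserts
  ((uniq.zip names).foldl (fun h p =>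
      h.insert p.1 (if clashes.contains p.2 then p.2 ++ " (" ++ p.1 ++ ")" else p.2))
    (PySem.Dict.empty : PySem.Dict String String)).items

-- ===== PRECONDITION & SPEC =====
def Spec_locale_headings_py (locales : List String) (out : List (String × String)) : Prop := out = locale_headings_py_alt locales
instance (locales : List String) (out : List (String × String)) : Decidable (Spec_locale_headings_py locales out) := by unfold Spec_locale_headings_py; infer_instance

-- ===== CLAIM (what is proved, stated in full; the proofs are below) =====
def Claim_equal_locale_headings_py : Prop := ∀ (locales : List String), Dom_locale_headings_py locales → Spec_locale_headings_py locales (locale_headings_py locales)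

-- ===== LEMMAS AND PROOFS =====

-- pair each key with f of it
def pvPairF (f : String → String) (k : String) : String × String := (k, f k)

lemma pv_contains_mkF (f : String → String) (s : List String) (x : String) :
    (PySem.Dict.mk (s.map (pvPairF f))).contains x = s.contains x := by
  simp [PySem.Dict.contains_eq_decide_mem_keys, PySem.Dict.keys, List.map_map, pvPairF, Function.comp]

lemma pv_insert_mkF (f : String → String) (s : List String) (x : String) :
    (PySem.Dict.mk (s.map (pvPairF f))).insert x (f x) =
      PySem.Dict.mk ((PySem.Set.add s x).map (pvPairF f)) := by
  by_cases h : x ∈ s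
  · have hc : (PySem.Dict.mk (s.map (pvPairF f))).contains x = true := by
      rw [pv_contains_mkF]; simpa using h
    apply PySem.Dict.ext
    rw [PySem.Dict.items_insert_of_contains _ _ hc]
    have hadd : PySem.Set.add s x = s := by simp [PySem.Set.add, PySem.Set.contains, h]
    rw [hadd]
    show (s.map (pvPairF f)).map _ = s.map (pvPairF f)
    rw [List.map_map]
    apply List.map_congr_left
    intro k hk
    by_cases hkx : k = x
    · subst hkx; simp [pvPairF]
    · simp [pvPairF, hkx]
  · have hc : (PySem.Dict.mk (s.map (pvPairF f))).contains x = false := by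
      rw [pv_contains_mkF]; simpa using h
    apply PySem.Dict.ext
    rw [PySem.Dict.items_insert_of_not_contains _ _ hc]
    have hadd : PySem.Set.add s x = s ++ [x] := by simp [PySem.Set.add, PySem.Set.contains, h]
    rw [hadd]
    simp [pvPairF]

-- a loop of 'd[x] = f(x)' inserts dedups to first occurrences
lemma pv_fold_f (f : String → String) (l : List String) (s : List String) :
    l.foldl (fun d x => d.insert x (f x)) (PySem.Dict.mk (s.map (pvPairF f))) =
      PySem.Dict.mk ((PySem.Set.update s l).map (pvPairF f)) := by
  induction l generalizing s with
  | nil => simp [PySem.Set.update]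
  | cons x t ih =>
    rw [List.foldl_cons, pv_insert_mkF]
    rw [ih (PySem.Set.add s x)]
    simp [PySem.Set.update]

lemma pv_update_of_disjoint (l : List String) (s : List String)
    (hd : ∀ x ∈ l, x ∉ s) (hnd : l.Nodup) : PySem.Set.update s l = s ++ l := by
  induction l generalizing s with
  | nil => simp [PySem.Set.update]
  | cons x t ih =>
    have hx : x ∉ s := hd x (by simp)
    have hadd : PySem.Set.add s x = s ++ [x] := by simp [PySem.Set.add, PySem.Set.contains, hx]
    have hstep : PySem.Set.update s (x :: t) = PySem.Set.update (s ++ [x]) t := by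
      simp [PySem.Set.update, hadd]
    have hdisj : ∀ y ∈ t, y ∉ s ++ [x] := by
      intro y hy hmem
      rcases List.mem_append.mp hmem with h | h
      · exact hd y (List.mem_cons_of_mem _ hy) h
      · have : y = x := by simpa using h
        exact (List.nodup_cons.mp hnd).1 (this ▸ hy)
    rw [hstep, ih (s ++ [x]) hdisj (List.nodup_cons.mp hnd).2]
    simp

lemma pv_ofList_nodup (l : List String) (hnd : l.Nodup) : PySem.Set.ofList l = l := by
  rw [PySem.Set.ofList_eq_foldl]
  have := pv_update_of_disjoint l [] (by simp) hnd
  simpa [PySem.Set.update] using this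

lemma pv_get_mk (f : String → String) (s : List String) (hnd : s.Nodup) (x : String) (hx : x ∈ s) :
    (PySem.Dict.mk (s.map (pvPairF f))).get? x = some (f x) := by
  apply PySem.Dict.get?_of_mem_items
  · exact List.mem_map_of_mem (f := pvPairF f) hx
  · show (((s.map (pvPairF f))).map (·.1)).Nodup
    simpa [List.map_map, pvPairF, Function.comp_def] using hnd

lemma pv_fold_f0 (f : String → String) (l : List String) :
    l.foldl (fun d x => d.insert x (f x)) (PySem.Dict.empty : PySem.Dict String String) =
      PySem.Dict.mk ((PySem.Set.ofList l).map (pvPairF f)) := by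
  have h := pv_fold_f f l []
  rw [PySem.Set.ofList_eq_foldl]
  simpa [PySem.Set.update] using h

-- the first components of the adjacent equal pairs of a list
def pvAdjDups (l : List String) : List String :=
  ((l.zip l.tail).filter (fun p => p.1 == p.2)).map (·.1)

lemma pv_mem_adjDups_sub (l : List String) (x : String) (hx : x ∈ pvAdjDups l) : x ∈ l := by
  unfold pvAdjDups at hx
  rcases List.mem_map.mp hx with ⟨p, hp, rfl⟩
  exact (List.of_mem_zip (List.mem_of_mem_filter hp)).1

-- in a weakly sorted list, an element repeats iff it heads an adjacent equal pair
lemma pv_mem_adjDups_iff (l : List String) (hs : l.Pairwise (· ≤ ·)) (x : String) :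
    x ∈ pvAdjDups l ↔ 2 ≤ l.count x := by
  induction l with
  | nil => simp [pvAdjDups]
  | cons a t ih =>
    cases t with
    | nil =>
      simp only [pvAdjDups, List.tail_cons, List.zip_nil_right, List.filter_nil, List.map_nil,
        List.not_mem_nil, false_iff, not_le, List.count_singleton]
      split <;> omega
    | cons b t' =>
      have hs' : (b :: t').Pairwise (· ≤ ·) := (List.pairwise_cons.mp hs).2
      have hab : a ≤ b := (List.pairwise_cons.mp hs).1 b (by simp)
      have hcons : pvAdjDups (a :: b :: t') =
          (if a == b then [a] else []) ++ pvAdjDups (b :: t') := by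
        by_cases h : a = b <;> simp [pvAdjDups, h]
      rw [hcons]
      by_cases hx : x = a
      · subst hx
        by_cases h : x = b
        · subst h
          have hmem : x ∈ (if x == x then [x] else []) ++ pvAdjDups (x :: t') := by simp
          have h2 : 2 ≤ (x :: x :: t').count x := by
            have : (x :: x :: t').count x = t'.count x + 2 := by simp
            omega
          exact ⟨fun _ => h2, fun _ => hmem⟩
        · have hlt : x < b := lt_of_le_of_ne hab h
          have hnot : x ∉ (b :: t') := by
            intro hmem
            have hble : b ≤ x := by
              rcases List.mem_cons.mp hmem with rfl | hmem'
              · exact le_refl _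
              · exact (List.pairwise_cons.mp hs').1 x hmem'
            exact absurd hble (not_le_of_gt hlt)
          have hc0 : (b :: t').count x = 0 := List.count_eq_zero.mpr hnot
          have hne : (x == b) = false := beq_eq_false_iff_ne.mpr h
          rw [hne]
          simp only [if_neg Bool.false_ne_true, List.nil_append]
          constructor
          · intro hmem
            exact absurd (pv_mem_adjDups_sub _ _ hmem) hnot
          · intro hcnt
            exfalso
            have : (x :: b :: t').count x = (b :: t').count x + 1 := by
              simp [List.count_cons]
            omega
      · have hxm : x ∈ (if a == b then [a] else []) ++ pvAdjDups (b :: t') ↔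
            x ∈ pvAdjDups (b :: t') := by
          by_cases h : a = b
          · have hxb : ¬ x = b := fun e => hx (e.trans h.symm)
            simp [h, hxb]
          · simp [h]
        rw [hxm, ih hs']
        have : (a :: b :: t').count x = (b :: t').count x := by
          simp [List.count_cons, Ne.symm hx]
        omega

-- ===== VERDICT (by name: the statement is the Claim_ definition above) =====
set_option maxHeartbeats 1000000 in
theorem locale_headings_py_spec : Claim_equal_locale_headings_py := by
  intro locales _
  unfold Spec_locale_headings_py locale_headings_py locale_headings_py_alt
  have hnd : (PySem.Set.ofList locales).Nodup := PySem.Set.nodup_ofList locales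
  set u := PySem.Set.ofList locales with hu
  have hded : PySem.List.dedup locales = u := PySem.List.dedup_eq_ofList locales
  have hzip : ∀ v : List String, v.zip (v.map pvLocaleDisplayName) = v.map (fun k => (k, pvLocaleDisplayName k)) := by
    intro v
    induction v with
    | nil => rfl
    | cons a t ih => simp [ih]
  dsimp only []
  rw [hded, hzip u, List.foldl_map]
  rw [pv_fold_f0 pvLocaleDisplayName locales]
  dsimp only
  rw [pv_fold_f0 (fun y =>
      if (PySem.Set.ofList
            (List.map (fun x => x.1)
              (List.filter (fun p => p.1 == p.2)
                ((PySem.List.sorted (List.map pvLocaleDisplayName u) fun x => x).zip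
                  (PySem.List.slice (PySem.List.sorted (List.map pvLocaleDisplayName u) fun x => x)
                    (some 1)))))).contains (pvLocaleDisplayName y) = true
      then pvLocaleDisplayName y ++ " (" ++ y ++ ")" else pvLocaleDisplayName y) u]
  rw [pv_ofList_nodup u hnd]
  rw [pv_fold_f0 _ locales]
  show List.map _ u = List.map _ u
  apply List.map_congr_left
  intro loc hloc
  simp only [pvPairF]
  have hgd : ((PySem.Dict.mk (u.map (pvPairF pvLocaleDisplayName))).get? loc).getD ""
      = pvLocaleDisplayName loc := by
    rw [pv_get_mk _ _ hnd _ hloc, Option.getD_some]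
  rw [hgd]
  have hv : (PySem.Dict.mk (u.map (pvPairF pvLocaleDisplayName))).values = u.map pvLocaleDisplayName := by
    show (u.map (pvPairF pvLocaleDisplayName)).map (·.2) = _
    simp [List.map_map, pvPairF, Function.comp_def]
  rw [PySem.Dict.getD_foldl_insert_add_one, hv, PySem.Dict.getD_empty]
  set nm := pvLocaleDisplayName loc with hnm
  set names := u.map pvLocaleDisplayName with hnames
  set ranked := PySem.List.sorted names (fun x => x) false with hranked
  -- B's clash test says exactly 'nm occurs at least twice among the names'
  have hslice : PySem.List.slice ranked (some 1) none = ranked.tail :=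
    PySem.List.slice_from_one ranked
  have hsorted : ranked.Pairwise (· ≤ ·) := by
    have := PySem.List.sorted_pairwise (xs := names) (key := fun x => x)
    simpa using this
  have hcount : ranked.count nm = names.count nm :=
    (PySem.List.sorted_perm names (fun x => x) false).count_eq nm
  have hcond : ((PySem.Set.ofList (((ranked.zip (PySem.List.slice ranked (some 1) none)).filter
      (fun p => p.1 == p.2)).map (·.1))).contains nm = true) ↔ 2 ≤ names.count nm := by
    rw [hslice]
    have hmem : nm ∈ PySem.Set.ofList (((ranked.zip ranked.tail).filter
        (fun p => p.1 == p.2)).map (·.1)) ↔ nm ∈ pvAdjDups ranked := by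
      rw [PySem.Set.mem_ofList]
      rfl
    rw [show ((PySem.Set.ofList (((ranked.zip ranked.tail).filter
        (fun p => p.1 == p.2)).map (·.1))).contains nm = true) ↔
        nm ∈ PySem.Set.ofList (((ranked.zip ranked.tail).filter
        (fun p => p.1 == p.2)).map (·.1)) from by
      simp [PySem.Set.contains]]
    rw [hmem, pv_mem_adjDups_iff ranked hsorted nm, hcount]
  by_cases h : 2 ≤ names.count nm
  · rw [if_pos (hcond.mpr h), if_pos (show (0:Int) + (names.count nm : Int) > 1 by omega)]
  · rw [if_neg (fun hc => h (hcond.mp hc)),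
        if_neg (show ¬ ((0:Int) + (names.count nm : Int) > 1) by omega)]
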